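-- pv_equiv track=rewrite | github.com/DavidivoWang/tonesoul-mirrortone | tonesoul/memory/subjectivity_review_batch.py | _handoff_shape
-- ===== SOURCE A (Python) =====
-- from typing import Dict, List, Optional
--
-- def _handoff_shape(review_groups: List[Dict[str, object]]) -> str:
--     if not review_groups:
--         return "empty_queue"
--     postures = {str(group.get("queue_posture") or "") for group in review_groups}
--     if postures and postures.issubset({"stable_deferred_history"}):
--         return "stable_history_only"
--     if postures & {"active_manual_review_queue", "active_review_queue", "deferred_revisit_queue"}:
--         return "action_required"
--     if postures & {"active_deferred_queue", "active_reject_queue", "rejected_reentry_watch"}: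
--         return "monitoring_queue"
--     return "mixed_queue"
-- ===== SOURCE B (Python) =====
-- from typing import Dict, List
--
-- _RANK = {
--     "active_manual_review_queue": 0, "active_review_queue": 0, "deferred_revisit_queue": 0,
--     "active_deferred_queue": 1, "active_reject_queue": 1, "rejected_reentry_watch": 1,
--     "stable_deferred_history": 3,
-- }
-- _LABEL = ["action_required", "monitoring_queue", "mixed_queue", "stable_history_only"]
--
-- def _handoff_shape(review_groups: List[Dict[str, object]]) -> str:
--     if not review_groups:
--         return "empty_queue"
--     m = min(_RANK.get(str(g.get("queue_posture") or ""), 2) for g in review_groups)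
--     return _LABEL[m]
-- ===== Notes on version B (the rewrite author's own statement) =====
-- stated objective: alternative
-- what changed: B replaces A's build-a-set-of-postures-then-run-set-queries (subset and two intersections) with an arithmetic reduction: each group's posture is mapped to a numeric severity rank (action=0, monitoring=1, other=2, stable=3), the minimum rank over the queue is taken, and the answer is read from a label table indexed by that minimum; no set and no boolean cascade.
import Mathlib
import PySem

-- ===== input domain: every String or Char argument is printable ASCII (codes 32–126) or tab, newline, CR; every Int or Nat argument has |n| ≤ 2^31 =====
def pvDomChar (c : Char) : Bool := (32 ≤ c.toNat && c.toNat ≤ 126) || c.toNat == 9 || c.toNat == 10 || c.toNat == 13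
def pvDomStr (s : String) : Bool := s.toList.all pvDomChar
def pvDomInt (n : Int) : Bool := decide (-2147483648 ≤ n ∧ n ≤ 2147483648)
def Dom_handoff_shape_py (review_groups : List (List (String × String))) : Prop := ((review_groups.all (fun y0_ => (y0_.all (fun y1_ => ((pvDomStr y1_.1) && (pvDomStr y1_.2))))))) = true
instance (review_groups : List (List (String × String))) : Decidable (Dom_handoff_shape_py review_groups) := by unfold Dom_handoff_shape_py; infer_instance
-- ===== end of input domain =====

-- B replaces A's set-building-and-set-query classification by an arithmetic reduction:
-- map each posture to a severity rank, take the minimum, read the label from a table. Objective: alternative.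

-- ===== PORT A =====
-- str(group.get("queue_posture") or ""): values are strings here, and 'x or ""' is x unless x is missing/empty,
-- in both cases "", so it is exactly Dict.getD g "queue_posture" "".
def pvPostureA (g : List (String × String)) : String := PySem.Dict.getD (PySem.Dict.mk g) "queue_posture" ""

def handoff_shape_py (review_groups : List (List (String × String))) : String :=
  if review_groups = [] then "empty_queue"
  else
    let postures : PySem.Set String := PySem.Set.ofList (review_groups.map pvPostureA)
    if (!postures.isEmpty) && PySem.Set.issubset postures ["stable_deferred_history"] then
      "stable_history_only"
    else if !(PySem.Set.inter postures ["active_manual_review_queue", "active_review_queue", "deferred_revisit_queue"]).isEmpty then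
      "action_required"
    else if !(PySem.Set.inter postures ["active_deferred_queue", "active_reject_queue", "rejected_reentry_watch"]).isEmpty then
      "monitoring_queue"
    else "mixed_queue"

-- ===== PORT B =====
-- _RANK.get(p, 2)
def pvRank (p : String) : Nat :=
  PySem.Dict.getD (PySem.Dict.mk
    [("active_manual_review_queue", 0), ("active_review_queue", 0), ("deferred_revisit_queue", 0),
     ("active_deferred_queue", 1), ("active_reject_queue", 1), ("rejected_reentry_watch", 1),
     ("stable_deferred_history", 3)]) p 2

def pvLabel : List String := ["action_required", "monitoring_queue", "mixed_queue", "stable_history_only"]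

def handoff_shape_py_alt (review_groups : List (List (String × String))) : String :=
  if review_groups = [] then "empty_queue"
  else
    -- min(...) over a nonempty list of ranks (Python's min; first extremal element)
    let m := (PySem.List.min? (review_groups.map (fun g => pvRank (pvPostureA g))) (fun x => x)).getD 0
    -- _LABEL[m]: m is always in [0,3], so the index is in range
    pvLabel.getD m ""

-- ===== PRECONDITION & SPEC =====
def Spec_handoff_shape_py (review_groups : List (List (String × String))) (out : String) : Prop := out = handoff_shape_py_alt review_groups
instance (review_groups : List (List (String × String))) (out : String) : Decidable (Spec_handoff_shape_py review_groups out) := by unfold Spec_handoff_shape_py; infer_instance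

-- ===== CLAIM (what is proved, stated in full; the proofs are below) =====
def Claim_equal_handoff_shape_py : Prop := ∀ (review_groups : List (List (String × String))), Dom_handoff_shape_py review_groups → Spec_handoff_shape_py review_groups (handoff_shape_py review_groups)

-- ===== LEMMAS AND PROOFS =====

def pvAction : List String := ["active_manual_review_queue", "active_review_queue", "deferred_revisit_queue"]
def pvMonitor : List String := ["active_deferred_queue", "active_reject_queue", "rejected_reentry_watch"]

-- rank as an if-chain over the two posture families
theorem pvRank_eq (p : String) :
    pvRank p = (if pvAction.contains p then 0 else if pvMonitor.contains p then 1
                else if p == "stable_deferred_history" then 3 else 2) := by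
  by_cases h1 : p = "active_manual_review_queue"
  · subst h1; decide
  by_cases h2 : p = "active_review_queue"
  · subst h2; decide
  by_cases h3 : p = "deferred_revisit_queue"
  · subst h3; decide
  by_cases h4 : p = "active_deferred_queue"
  · subst h4; decide
  by_cases h5 : p = "active_reject_queue"
  · subst h5; decide
  by_cases h6 : p = "rejected_reentry_watch"
  · subst h6; decide
  by_cases h7 : p = "stable_deferred_history"
  · subst h7; decide
  have g1 := Ne.symm h1
  have g2 := Ne.symm h2
  have g3 := Ne.symm h3
  have g4 := Ne.symm h4
  have g5 := Ne.symm h5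
  have g6 := Ne.symm h6
  have g7 := Ne.symm h7
  simp [pvRank, pvAction, pvMonitor, PySem.Dict.getD_eq_get?_getD, 
    PySem.Dict.get?, g1, g2, g3, g4, g5, g6, g7, h1, h2, h3, h4, h5, h6, h7]

theorem pvRank_le (p : String) : pvRank p ≤ 3 := by
  rw [pvRank_eq]; split_ifs <;> omega

-- the classification value of a posture list
def pvShape (ps : List String) : Nat :=
  if ps.any (fun p => pvAction.contains p) then 0
  else if ps.any (fun p => pvMonitor.contains p) then 1
  else if ps.all (fun p => p == "stable_deferred_history") then 3 else 2

theorem pvMin_rank_cons (p : String) (t : List String) :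
    min (pvRank p) (pvShape t) = pvShape (p :: t) := by
  have hl := pvRank_le p
  rw [pvRank_eq]
  simp only [pvShape, List.any_cons, List.all_cons]
  cases h1 : pvAction.contains p <;> cases h2 : pvMonitor.contains p <;>
    by_cases h3 : p = "stable_deferred_history" <;>
    cases h4 : t.any (fun p => pvAction.contains p) <;>
    cases h5 : t.any (fun p => pvMonitor.contains p) <;>
    by_cases h6 : (t.all fun p => p == "stable_deferred_history") = true <;>
    simp [h1, h2, h3, h4, h5, h6]

theorem pvFoldMin (ps : List String) (a : Nat) (ha : a ≤ 3) :
    (ps.map pvRank).foldl min a = min a (pvShape ps) := by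
  induction ps generalizing a with
  | nil =>
    simp only [List.map_nil, List.foldl_nil, pvShape, List.any_nil, List.all_nil]
    simp [Nat.min_def]; omega
  | cons p t ih =>
    rw [List.map_cons, List.foldl_cons,
        ih (min a (pvRank p)) (le_trans (Nat.min_le_right _ _) (pvRank_le p)),
        Nat.min_assoc, pvMin_rank_cons]

-- action/monitor postures are never the stable one
theorem pvAction_ne_stable (p : String) (h : pvAction.contains p = true) :
    (p == "stable_deferred_history") = false := by
  simp only [pvAction, List.contains_cons, List.contains_nil] at h
  simp only [Bool.or_eq_true, beq_iff_eq] at h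
  rcases h with h | h | h | h <;> first | (subst h; decide) | simp at h

theorem pvMonitor_ne_stable (p : String) (h : pvMonitor.contains p = true) :
    (p == "stable_deferred_history") = false := by
  simp only [pvMonitor, List.contains_cons, List.contains_nil] at h
  simp only [Bool.or_eq_true, beq_iff_eq] at h
  rcases h with h | h | h | h <;> first | (subst h; decide) | simp at h

-- A's first condition as an 'all' over the posture list
theorem pvA_first (rg : List (List (String × String))) (h : rg ≠ []) :
    ((!(PySem.Set.ofList (rg.map pvPostureA) : PySem.Set String).isEmpty)
      && PySem.Set.issubset (PySem.Set.ofList (rg.map pvPostureA)) ["stable_deferred_history"])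
    = (rg.map pvPostureA).all (fun p => p == "stable_deferred_history") := by
  have hne : (PySem.Set.ofList (rg.map pvPostureA) : PySem.Set String) ≠ [] := by
    intro he
    have : pvPostureA (rg.head h) ∈ (PySem.Set.ofList (rg.map pvPostureA) : PySem.Set String) := by
      rw [PySem.Set.mem_ofList]
      exact List.mem_map_of_mem (List.head_mem h)
    simp [he] at this
  rw [List.isEmpty_eq_false_iff.mpr hne]
  simp only [Bool.not_false, Bool.true_and]
  by_cases hs : ∀ x ∈ rg.map pvPostureA, x = "stable_deferred_history"
  · have h1 : PySem.Set.issubset (PySem.Set.ofList (rg.map pvPostureA)) ["stable_deferred_history"] = true :=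
      (PySem.Set.issubset_iff _ _).mpr (by
        intro x hx
        have := hs x ((PySem.Set.mem_ofList _ _).mp hx)
        simp [this])
    have h2 : (rg.map pvPostureA).all (fun p => p == "stable_deferred_history") = true := by
      rw [List.all_eq_true]
      intro x hx
      rw [beq_iff_eq]
      exact hs x (by simpa using hx)
    rw [h1, h2]
  · push Not at hs
    obtain ⟨x, hx, hxe⟩ := hs
    have h1 : PySem.Set.issubset (PySem.Set.ofList (rg.map pvPostureA)) ["stable_deferred_history"] = false := by
      rw [Bool.eq_false_iff]
      intro hc
      have := (PySem.Set.issubset_iff _ _).mp hc x ((PySem.Set.mem_ofList _ _).mpr hx)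
      simp at this; exact hxe this
    have h2 : (rg.map pvPostureA).all (fun p => p == "stable_deferred_history") = false := by
      rw [Bool.eq_false_iff]
      intro hc
      have := List.all_eq_true.mp hc x (by simpa using hx)
      exact hxe (by simpa using this)
    rw [h1, h2]

-- A's intersection tests as an 'any' over the posture list
theorem pvA_inter (rg : List (List (String × String))) (s : List String) :
    (!(PySem.Set.inter (PySem.Set.ofList (rg.map pvPostureA)) s).isEmpty)
    = (rg.map pvPostureA).any (fun p => s.contains p) := by
  by_cases h : ∃ x ∈ rg.map pvPostureA, x ∈ s
  · obtain ⟨x, hx, hxs⟩ := h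
    have hm : x ∈ PySem.Set.inter (PySem.Set.ofList (rg.map pvPostureA)) s :=
      (PySem.Set.mem_inter _ _ _).mpr ⟨(PySem.Set.mem_ofList _ _).mpr hx, hxs⟩
    rw [List.isEmpty_eq_false_iff.mpr (List.ne_nil_of_mem hm)]
    simp only [Bool.not_false]
    exact (List.any_eq_true.mpr ⟨x, hx, by simpa using hxs⟩).symm
  · push_neg at h
    have he : PySem.Set.inter (PySem.Set.ofList (rg.map pvPostureA)) s = [] := by
      rcases hl : PySem.Set.inter (PySem.Set.ofList (rg.map pvPostureA)) s with _ | ⟨y, t⟩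
      · rfl
      · exfalso
        have hy : y ∈ PySem.Set.inter (PySem.Set.ofList (rg.map pvPostureA)) s := by
          rw [hl]; exact List.mem_cons_self
        obtain ⟨h1, h2⟩ := (PySem.Set.mem_inter _ _ _).mp hy
        exact h y ((PySem.Set.mem_ofList _ _).mp h1) h2
    rw [he]
    simp only [List.isEmpty_nil, Bool.not_true]
    symm
    rw [Bool.eq_false_iff]
    intro hc
    obtain ⟨x, hx, hxs⟩ := List.any_eq_true.mp hc
    exact h x hx (by simpa using hxs)

-- B's min is pvShape of the posture list
theorem pvB_min (g : List (String × String)) (t : List (List (String × String))) :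
    (PySem.List.min? ((g :: t).map (fun g => pvRank (pvPostureA g))) (fun x => x)).getD 0
      = pvShape ((g :: t).map pvPostureA) := by
  rw [List.map_cons, PySem.List.min?_id_cons]
  have : t.map (fun g => pvRank (pvPostureA g)) = (t.map pvPostureA).map pvRank := by
    rw [List.map_map]; rfl
  rw [Option.getD_some, this, pvFoldMin _ _ (pvRank_le _), pvMin_rank_cons, List.map_cons]

-- ===== VERDICT (by name: the statement is the Claim_ definition above) =====
theorem handoff_shape_py_spec : Claim_equal_handoff_shape_py := by
  intro rg _
  unfold Spec_handoff_shape_py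
  rcases rg with _ | ⟨g, t⟩
  · rfl
  · have hne : (g :: t) ≠ ([] : List (List (String × String))) := by simp
    simp only [handoff_shape_py, handoff_shape_py_alt, if_neg hne]
    rw [pvA_first _ hne, pvA_inter, pvA_inter, pvB_min]
    have e1 : (["active_manual_review_queue", "active_review_queue", "deferred_revisit_queue"] : List String) = pvAction := rfl
    have e2 : (["active_deferred_queue", "active_reject_queue", "rejected_reentry_watch"] : List String) = pvMonitor := rfl
    rw [e1, e2]
    set ps := (g :: t).map pvPostureA with hps
    simp only [pvShape]
    by_cases hA : ps.any (fun p => pvAction.contains p) = true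
    · have hS : ps.all (fun p => p == "stable_deferred_history") = false := by
        rw [Bool.eq_false_iff]
        intro hc
        obtain ⟨x, hx, hxa⟩ := List.any_eq_true.mp hA
        have := List.all_eq_true.mp hc x hx
        rw [pvAction_ne_stable x hxa] at this; exact Bool.false_ne_true this
      rw [hS, hA]; simp [pvLabel]
    · rw [Bool.not_eq_true] at hA
      by_cases hM : ps.any (fun p => pvMonitor.contains p) = true
      · have hS : ps.all (fun p => p == "stable_deferred_history") = false := by
          rw [Bool.eq_false_iff]
          intro hc
          obtain ⟨x, hx, hxa⟩ := List.any_eq_true.mp hM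
          have := List.all_eq_true.mp hc x hx
          rw [pvMonitor_ne_stable x hxa] at this; exact Bool.false_ne_true this
        rw [hS, hA, hM]; simp [pvLabel]
      · rw [Bool.not_eq_true] at hM
        by_cases hS : ps.all (fun p => p == "stable_deferred_history") = true
        · rw [hS, hA, hM]; simp [pvLabel]
        · rw [Bool.not_eq_true] at hS
          rw [hS, hA, hM]; simp [pvLabel]
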